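-- pv_equiv track=rewrite | github.com/emresencan/inspectelement | src/inspectelement/locator_generator.py | extract_css_parent_if_descendant
-- ===== SOURCE A (Python) =====
-- def extract_css_parent_if_descendant(locator: str) -> str | None:
--     in_quote: str | None = None
--     bracket_depth = 0
--     paren_depth = 0
--     split_index = -1
--
--     for index, char in enumerate(locator):
--         if in_quote:
--             if char == in_quote and locator[index - 1] != "\\":
--                 in_quote = None
--             continue
--         if char in {"'", '"'}:
--             in_quote = char
--             continue
--         if char == "[":
--             bracket_depth += 1
--             continue
--         if char == "]":
--             bracket_depth = max(0, bracket_depth - 1)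
--             continue
--         if char == "(":
--             paren_depth += 1
--             continue
--         if char == ")":
--             paren_depth = max(0, paren_depth - 1)
--             continue
--         if bracket_depth > 0 or paren_depth > 0 or not char.isspace():
--             continue
--
--         left = index - 1
--         while left >= 0 and locator[left].isspace():
--             left -= 1
--         right = index + 1
--         while right < len(locator) and locator[right].isspace():
--             right += 1
--         if left < 0 or right >= len(locator):
--             continue
--         if locator[left] in {">", "+", "~", ","} or locator[right] in {">", "+", "~", ","}:
--             continue
--         split_index = index
--
--     if split_index < 0:
--         return None
--     parent = locator[:split_index].rstrip()
--     child = locator[split_index:].strip()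
--     if not parent or not child:
--         return None
--     return parent
-- ===== SOURCE B (Python) =====
-- COMBINATORS = {">", "+", "~", ","}
--
--
-- def extract_css_parent_if_descendant(locator: str) -> str | None:
--     # Pass 1: record every top-level whitespace position (outside quotes/brackets/parens).
--     runs = []
--     in_quote = None
--     bracket_depth = 0
--     paren_depth = 0
--     for index, char in enumerate(locator):
--         if in_quote:
--             if char == in_quote and locator[index - 1] != "\\":
--                 in_quote = None
--         elif char in ("'", '"'):
--             in_quote = char
--         elif char == "[":
--             bracket_depth += 1
--         elif char == "]":
--             bracket_depth = max(0, bracket_depth - 1)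
--         elif char == "(":
--             paren_depth += 1
--         elif char == ")":
--             paren_depth = max(0, paren_depth - 1)
--         elif bracket_depth == 0 and paren_depth == 0 and char.isspace():
--             runs.append(index)
--     # Pass 2: take the last recorded position whose non-whitespace neighbours on
--     # both sides exist and are not CSS combinators; slicing + strip replaces the scans.
--     for i in reversed(runs):
--         left_part = locator[:i].rstrip()
--         right_part = locator[i + 1:].lstrip()
--         if not left_part or not right_part:
--             continue
--         if left_part[-1] in COMBINATORS or right_part[0] in COMBINATORS:
--             continue
--         return left_part
--     return None
-- ===== Notes on version B (the rewrite author's own statement) =====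
-- stated objective: alternative
-- what changed: A decides each whitespace position inside the scan with inline left/right while-loop neighbour scans and keeps a running split index; B first records all top-level whitespace positions in one pass, then in a second pass picks the last qualifying one using slice+rstrip/lstrip instead of character scans, returning the stripped prefix directly.
import Mathlib
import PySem

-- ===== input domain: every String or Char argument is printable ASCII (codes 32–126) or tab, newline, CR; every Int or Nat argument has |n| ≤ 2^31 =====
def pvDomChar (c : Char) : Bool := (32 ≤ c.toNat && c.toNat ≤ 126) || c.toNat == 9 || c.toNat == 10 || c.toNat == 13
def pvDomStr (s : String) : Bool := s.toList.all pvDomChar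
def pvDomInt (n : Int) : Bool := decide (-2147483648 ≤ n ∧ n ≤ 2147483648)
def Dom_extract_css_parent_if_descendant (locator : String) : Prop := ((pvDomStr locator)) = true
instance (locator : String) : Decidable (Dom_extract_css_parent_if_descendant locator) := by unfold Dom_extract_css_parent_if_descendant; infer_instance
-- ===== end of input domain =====

set_option maxRecDepth 4096


-- B replaces A's in-loop neighbour scans and running split index by two passes:
-- record the top-level whitespace positions, then pick the last qualifying one
-- using slice+rstrip/lstrip; same return value, different decomposition.

-- ===== PORT A =====
def pvCombo (c : Char) : Bool := c == '>' || c == '+' || c == '~' || c == ','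

-- while left >= 0 and locator[left].isspace(): left -= 1
def pvScanLeft (cs : List Char) (left : Int) : Int :=
  if h : 0 ≤ left ∧ PySem.Chars.isspace (PySem.List.pyGetD cs left ' ') then
    pvScanLeft cs (left - 1)
  else left
termination_by (left + 1).toNat
decreasing_by omega

-- while right < len(locator) and locator[right].isspace(): right += 1
def pvScanRight (cs : List Char) (right : Int) : Int :=
  if h : right < (cs.length : Int) ∧ PySem.Chars.isspace (PySem.List.pyGetD cs right ' ') then
    pvScanRight cs (right + 1)
  else right
termination_by ((cs.length : Int) - right).toNat
decreasing_by omega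

-- the for-loop of A: state (in_quote, bracket_depth, paren_depth, split_index)
def pvLoopA (cs : List Char) : List Char → Nat → Option Char → Int → Int → Int → Int
  | [], _, _, _, _, split => split
  | c :: rest, i, q, bd, pd, split =>
    match q with
    | some qc =>
      if c == qc ∧ PySem.List.pyGet? cs ((i : Int) - 1) ≠ some '\\' then
        pvLoopA cs rest (i + 1) none bd pd split
      else pvLoopA cs rest (i + 1) (some qc) bd pd split
    | none =>
      if c == '\'' ∨ c == '"' then pvLoopA cs rest (i + 1) (some c) bd pd split
      else if c == '[' then pvLoopA cs rest (i + 1) none (bd + 1) pd split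
      else if c == ']' then pvLoopA cs rest (i + 1) none (max 0 (bd - 1)) pd split
      else if c == '(' then pvLoopA cs rest (i + 1) none bd (pd + 1) split
      else if c == ')' then pvLoopA cs rest (i + 1) none bd (max 0 (pd - 1)) split
      else if bd > 0 ∨ pd > 0 ∨ ¬ PySem.Chars.isspace c then
        pvLoopA cs rest (i + 1) none bd pd split
      else
        let left := pvScanLeft cs ((i : Int) - 1)
        let right := pvScanRight cs ((i : Int) + 1)
        if left < 0 ∨ (cs.length : Int) ≤ right then pvLoopA cs rest (i + 1) none bd pd split
        else if pvCombo (PySem.List.pyGetD cs left ' ') ∨ pvCombo (PySem.List.pyGetD cs right ' ') then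
          pvLoopA cs rest (i + 1) none bd pd split
        else pvLoopA cs rest (i + 1) none bd pd (i : Int)

def extract_css_parent_if_descendant (locator : String) : Option String :=
  let cs := locator.toList
  let split := pvLoopA cs cs 0 none 0 0 (-1)
  if split < 0 then none
  else
    let parent := PySem.Chars.rstrip (PySem.List.slice cs none (some split))
    let child := PySem.Chars.strip (PySem.List.slice cs (some split) none)
    if parent = [] ∨ child = [] then none
    else some (String.ofList parent)

-- ===== PORT B =====
-- pass 1: record top-level whitespace positions
def pvLoopB (cs : List Char) : List Char → Nat → Option Char → Int → Int → List Nat → List Nat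
  | [], _, _, _, _, runs => runs
  | c :: rest, i, q, bd, pd, runs =>
    match q with
    | some qc =>
      if c == qc ∧ PySem.List.pyGet? cs ((i : Int) - 1) ≠ some '\\' then
        pvLoopB cs rest (i + 1) none bd pd runs
      else pvLoopB cs rest (i + 1) (some qc) bd pd runs
    | none =>
      if c == '\'' ∨ c == '"' then pvLoopB cs rest (i + 1) (some c) bd pd runs
      else if c == '[' then pvLoopB cs rest (i + 1) none (bd + 1) pd runs
      else if c == ']' then pvLoopB cs rest (i + 1) none (max 0 (bd - 1)) pd runs
      else if c == '(' then pvLoopB cs rest (i + 1) none bd (pd + 1) runs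
      else if c == ')' then pvLoopB cs rest (i + 1) none bd (max 0 (pd - 1)) runs
      else if bd = 0 ∧ pd = 0 ∧ PySem.Chars.isspace c then
        pvLoopB cs rest (i + 1) none bd pd (runs ++ [i])
      else pvLoopB cs rest (i + 1) none bd pd runs

-- pass 2: last recorded position with valid non-combinator neighbours on both sides
def pvPickB (cs : List Char) : List Nat → Option String
  | [] => none
  | i :: rest =>
    let lp := PySem.Chars.rstrip (PySem.List.slice cs none (some (i : Int)))
    let rp := PySem.Chars.lstrip (PySem.List.slice cs (some ((i : Int) + 1)) none)
    if lp = [] ∨ rp = [] then pvPickB cs rest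
    else if pvCombo (PySem.List.pyGetD lp (-1) ' ') ∨ pvCombo (PySem.List.pyGetD rp 0 ' ') then
      pvPickB cs rest
    else some (String.ofList lp)

def extract_css_parent_if_descendant_alt (locator : String) : Option String :=
  let cs := locator.toList
  pvPickB cs (pvLoopB cs cs 0 none 0 0 []).reverse

-- ===== PRECONDITION & SPEC =====
def Spec_extract_css_parent_if_descendant (locator : String) (out : Option String) : Prop := out = extract_css_parent_if_descendant_alt locator
instance (locator : String) (out : Option String) : Decidable (Spec_extract_css_parent_if_descendant locator out) := by unfold Spec_extract_css_parent_if_descendant; infer_instance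

-- ===== CLAIM (what is proved, stated in full; the proofs are below) =====
def Claim_equal_extract_css_parent_if_descendant : Prop := ∀ (locator : String), Dom_extract_css_parent_if_descendant locator → Spec_extract_css_parent_if_descendant locator (extract_css_parent_if_descendant locator)

-- ===== LEMMAS AND PROOFS =====

-- the qualification test of B's second pass, as a predicate on a position
def pvCondB (cs : List Char) (i : Nat) : Bool :=
  let lp := PySem.Chars.rstrip (PySem.List.slice cs none (some (i : Int)))
  let rp := PySem.Chars.lstrip (PySem.List.slice cs (some ((i : Int) + 1)) none)
  !(lp = [] ∨ rp = [] : Bool) &&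
    !(pvCombo (PySem.List.pyGetD lp (-1) ' ') ∨ pvCombo (PySem.List.pyGetD rp 0 ' ') : Bool)

-- the split index A would hold after recording exactly the positions `runs`
def pvLast (cs : List Char) (runs : List Nat) : Int :=
  match runs.reverse.find? (pvCondB cs) with
  | some j => (j : Int)
  | none => -1

theorem pvCondB_true_iff (cs : List Char) (i : Nat) :
    pvCondB cs i = true ↔
      ¬(PySem.Chars.rstrip (PySem.List.slice cs none (some (i : Int))) = [] ∨
        PySem.Chars.lstrip (PySem.List.slice cs (some ((i : Int) + 1)) none) = []) ∧
      ¬(pvCombo (PySem.List.pyGetD (PySem.Chars.rstrip (PySem.List.slice cs none (some (i : Int)))) (-1) ' ') = true ∨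
        pvCombo (PySem.List.pyGetD (PySem.Chars.lstrip (PySem.List.slice cs (some ((i : Int) + 1)) none)) 0 ' ') = true) := by
  simp [pvCondB, not_or]

theorem pvPickB_eq_find (cs : List Char) (l : List Nat) :
    pvPickB cs l = (l.find? (pvCondB cs)).map
      (fun j => String.ofList (PySem.Chars.rstrip (PySem.List.slice cs none (some (j : Int))))) := by
  induction l with
  | nil => rfl
  | cons i rest ih =>
    by_cases h : pvCondB cs i = true
    · rw [List.find?_cons_of_pos h]
      obtain ⟨h1, h2⟩ := (pvCondB_true_iff cs i).mp h
      simp only [pvPickB]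
      rw [if_neg h1, if_neg h2]
      rfl
    · rw [List.find?_cons_of_neg h]
      simp only [pvPickB]
      by_cases h1 : (PySem.Chars.rstrip (PySem.List.slice cs none (some (i : Int))) = [] ∨
          PySem.Chars.lstrip (PySem.List.slice cs (some ((i : Int) + 1)) none) = [])
      · rw [if_pos h1]; exact ih
      · rw [if_neg h1]
        have h2 : (pvCombo (PySem.List.pyGetD (PySem.Chars.rstrip (PySem.List.slice cs none (some (i : Int)))) (-1) ' ') = true ∨
            pvCombo (PySem.List.pyGetD (PySem.Chars.lstrip (PySem.List.slice cs (some ((i : Int) + 1)) none)) 0 ' ') = true) := by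
          by_contra h2
          exact h ((pvCondB_true_iff cs i).mpr ⟨h1, h2⟩)
        rw [if_pos h2]; exact ih

theorem pvLast_append (cs : List Char) (runs : List Nat) (i : Nat) :
    pvLast cs (runs ++ [i]) = if pvCondB cs i then (i : Int) else pvLast cs runs := by
  simp only [pvLast, List.reverse_append, List.reverse_singleton, List.singleton_append]
  by_cases h : pvCondB cs i = true
  · rw [List.find?_cons_of_pos h, if_pos h]
  · rw [List.find?_cons_of_neg h, if_neg h]

-- characterisation of the left while-loop as rstrip of the prefix
theorem pvScanLeft_eq (cs : List Char) (i : Nat) (hi : i ≤ cs.length) :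
    pvScanLeft cs ((i : Int) - 1)
        = ((PySem.Chars.rstrip (cs.take i)).length : Int) - 1 ∧
      PySem.Chars.rstrip (cs.take i) = cs.take (PySem.Chars.rstrip (cs.take i)).length := by
  induction i with
  | zero =>
    rw [pvScanLeft, dif_neg (by simp)]
    simp [PySem.Chars.rstrip]
  | succ n ih =>
    have hn : n < cs.length := by omega
    have htake : cs.take (n + 1) = cs.take n ++ [cs[n]] := by
      rw [List.take_add_one, List.getElem?_eq_getElem hn]; rfl
    have hget : PySem.List.pyGetD cs (((n + 1 : Nat) : Int) - 1) ' ' = cs[n] := by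
      have h1 : (((n + 1 : Nat) : Int) - 1) = ((n : Nat) : Int) := by push_cast; ring
      rw [h1, PySem.List.pyGetD_natCast]
      exact List.getD_eq_getElem cs ' ' hn
    by_cases hsp : PySem.Chars.isspace cs[n] = true
    · have hr : PySem.Chars.rstrip (cs.take (n + 1)) = PySem.Chars.rstrip (cs.take n) := by
        simp only [PySem.Chars.rstrip, htake]
        rw [List.reverse_append]
        simp [hsp]
      rw [pvScanLeft, dif_pos ⟨by push_cast; omega, by rw [hget]; exact hsp⟩]
      have h2 : ((n + 1 : Nat) : Int) - 1 - 1 = ((n : Nat) : Int) - 1 := by push_cast; ring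
      rw [h2, hr]
      exact ih (by omega)
    · have hr : PySem.Chars.rstrip (cs.take (n + 1)) = cs.take n ++ [cs[n]] := by
        simp only [PySem.Chars.rstrip, htake]
        rw [List.reverse_append]
        simp [hsp]
      have hneg : ¬(0 ≤ ((n + 1 : Nat) : Int) - 1 ∧
          PySem.Chars.isspace (PySem.List.pyGetD cs (((n + 1 : Nat) : Int) - 1) ' ') = true) := by
        rw [hget]
        exact fun hcon => hsp hcon.2
      rw [pvScanLeft, dif_neg hneg]
      have hlen : (cs.take n ++ [cs[n]]).length = n + 1 := by
        simp only [List.length_append, List.length_take, List.length_cons, List.length_nil]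
        omega
      refine ⟨?_, ?_⟩
      · rw [hr, hlen]
      · rw [hr, hlen, ← htake]

theorem pvScanRight_eq (cs : List Char) (i : Nat) (hi : i ≤ cs.length) :
    pvScanRight cs (i : Int)
        = (cs.length : Int) - ((PySem.Chars.lstrip (cs.drop i)).length : Int) ∧
      PySem.Chars.lstrip (cs.drop i)
        = cs.drop (cs.length - (PySem.Chars.lstrip (cs.drop i)).length) := by
  induction hd : cs.length - i generalizing i with
  | zero =>
    have hieq : i = cs.length := by omega
    subst hieq
    rw [pvScanRight, dif_neg (by simp)]
    simp [PySem.Chars.lstrip]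
  | succ m ih =>
    have hlt : i < cs.length := by omega
    have hdrop : cs.drop i = cs[i] :: cs.drop (i + 1) := List.drop_eq_getElem_cons hlt
    have hget : PySem.List.pyGetD cs (i : Int) ' ' = cs[i] := by
      rw [PySem.List.pyGetD_natCast]
      exact List.getD_eq_getElem cs ' ' hlt
    by_cases hsp : PySem.Chars.isspace cs[i] = true
    · have hl : PySem.Chars.lstrip (cs.drop i) = PySem.Chars.lstrip (cs.drop (i + 1)) := by
        unfold PySem.Chars.lstrip
        rw [hdrop, List.dropWhile_cons, if_pos hsp]
      rw [pvScanRight, dif_pos ⟨by exact_mod_cast hlt, by rw [hget]; exact hsp⟩]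
      have h1 : (i : Int) + 1 = ((i + 1 : Nat) : Int) := by push_cast; ring
      rw [h1, hl]
      exact ih (i + 1) (by omega) (by omega)
    · have hl : PySem.Chars.lstrip (cs.drop i) = cs.drop i := by
        unfold PySem.Chars.lstrip
        rw [hdrop, List.dropWhile_cons, if_neg hsp]
      have hneg : ¬((i : Int) < (cs.length : Int) ∧
          PySem.Chars.isspace (PySem.List.pyGetD cs (i : Int) ' ') = true) := by
        rw [hget]
        exact fun hcon => hsp hcon.2
      rw [pvScanRight, dif_neg hneg]
      have hlen : (cs.drop i).length = cs.length - i := by simp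
      refine ⟨?_, ?_⟩
      · rw [hl, hlen]; omega
      · rw [hl, hlen]
        congr 1
        omega

-- rstrip of a list whose head is not whitespace is nonempty
theorem pvRstrip_ne_nil_of_head (c : Char) (l : List Char) (hc : ¬ PySem.Chars.isspace c) :
    PySem.Chars.rstrip (c :: l) ≠ [] := by
  intro h
  have : ∀ x ∈ (c :: l).reverse, PySem.Chars.isspace x := by
    have := congrArg List.length h
    simp only [PySem.Chars.rstrip, List.length_reverse, List.length_nil] at this
    intro x hx
    by_contra hxn
    have hne : List.dropWhile PySem.Chars.isspace (c :: l).reverse ≠ [] := by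
      intro hnil
      have := List.dropWhile_eq_nil_iff.mp hnil x hx
      exact hxn this
    exact hne (by simpa using List.length_eq_zero_iff.mp this)
  exact hc (this c (by simp))

-- A's inline qualification test at a top-level whitespace position agrees with pvCondB
theorem pvCond_agree (cs : List Char) (i : Nat) (s : Int) (hlt : i < cs.length) :
    ((if pvScanLeft cs ((i : Int) - 1) < 0 ∨ (cs.length : Int) ≤ pvScanRight cs ((i : Int) + 1) then
        (s : Int)
      else if pvCombo (PySem.List.pyGetD cs (pvScanLeft cs ((i : Int) - 1)) ' ')
            ∨ pvCombo (PySem.List.pyGetD cs (pvScanRight cs ((i : Int) + 1)) ' ') then s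
      else (i : Int))
      = if pvCondB cs i then (i : Int) else s) := by
  obtain ⟨hL, hLpre⟩ := pvScanLeft_eq cs i (le_of_lt hlt)
  have h1 : ((i : Int) + 1) = ((i + 1 : Nat) : Int) := by push_cast; ring
  obtain ⟨hR0, hRsuf⟩ := pvScanRight_eq cs (i + 1) (by omega)
  have hR : pvScanRight cs ((i : Int) + 1)
      = (cs.length : Int) - ((PySem.Chars.lstrip (cs.drop (i + 1))).length : Int) := by
    rw [h1]; exact hR0
  set lp := PySem.Chars.rstrip (cs.take i) with hlpdef
  set rp := PySem.Chars.lstrip (cs.drop (i + 1)) with hrpdef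
  have hsliceL : PySem.List.slice cs none (some (i : Int)) = cs.take i :=
    PySem.List.slice_to_natCast cs i
  have hsliceR : PySem.List.slice cs (some ((i : Int) + 1)) none = cs.drop (i + 1) := by
    rw [h1]; exact PySem.List.slice_from_natCast cs (i + 1)
  have hrpLen : rp.length ≤ cs.length := by
    have h := congrArg List.length hRsuf
    simp only [List.length_drop] at h
    omega
  have hlpLen : lp.length ≤ cs.length := by
    have h2 := congrArg List.length hLpre
    simp only [List.length_take] at h2
    omega
  by_cases hemp : lp = [] ∨ rp = []
  · -- left < 0 or right ≥ len
    have hcond : pvScanLeft cs ((i : Int) - 1) < 0 ∨ (cs.length : Int) ≤ pvScanRight cs ((i : Int) + 1) := by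
      rcases hemp with h | h
      · left; rw [hL, h]; simp
      · right; rw [hR, h]; simp
    rw [if_pos hcond]
    have : pvCondB cs i = false := by
      simp only [pvCondB, hsliceL, hsliceR, ← hlpdef, ← hrpdef]
      rcases hemp with h | h <;> simp [h]
    rw [this]; simp
  · push Not at hemp
    obtain ⟨hlpne, hrpne⟩ := hemp
    have hlpl : 0 < lp.length := List.length_pos_iff.mpr hlpne
    have hrpl : 0 < rp.length := List.length_pos_iff.mpr hrpne
    have hcondneg : ¬ (pvScanLeft cs ((i : Int) - 1) < 0 ∨ (cs.length : Int) ≤ pvScanRight cs ((i : Int) + 1)) := by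
      rw [hL, hR]
      push Not
      constructor <;> omega
    rw [if_neg hcondneg]
    -- neighbour characters
    have hLchar : PySem.List.pyGetD cs (pvScanLeft cs ((i : Int) - 1)) ' ' = PySem.List.pyGetD lp (-1) ' ' := by
      rw [hL]
      have hcast : ((lp.length : Int) - 1) = ((lp.length - 1 : Nat) : Int) := by omega
      rw [hcast, PySem.List.pyGetD_natCast,
          PySem.List.pyGetD_neg_ofNat lp 1 ' ' (by omega) (by omega)]
      have hopt : cs[lp.length - 1]? = lp[lp.length - 1]? := by
        conv_rhs => rw [hLpre]
        rw [List.getElem?_take]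
        simp [List.length_take, Nat.min_eq_left hlpLen, Nat.sub_lt hlpl]
      have hsome : lp[lp.length - 1]? = some (lp[lp.length - 1]'(by omega)) :=
        List.getElem?_eq_getElem (by omega)
      simp [List.getD, hopt, hsome]
    have hRchar : PySem.List.pyGetD cs (pvScanRight cs ((i : Int) + 1)) ' ' = PySem.List.pyGetD rp 0 ' ' := by
      rw [hR]
      have hcast : ((cs.length : Int) - (rp.length : Int)) = ((cs.length - rp.length : Nat) : Int) := by omega
      rw [hcast, PySem.List.pyGetD_natCast, PySem.List.pyGetD_zero]
      have hopt : rp[0]? = cs[cs.length - rp.length]? := by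
        conv_lhs => rw [hRsuf]
        rw [List.getElem?_drop]
        norm_num
      simp [List.getD, hopt]
    rw [hLchar, hRchar]
    by_cases hc : pvCombo (PySem.List.pyGetD lp (-1) ' ') ∨ pvCombo (PySem.List.pyGetD rp 0 ' ')
    · rw [if_pos hc]
      have : pvCondB cs i = false := by
        simp only [pvCondB, hsliceL, hsliceR, ← hlpdef, ← hrpdef]
        rcases hc with h | h <;> simp [h, hlpne, hrpne]
      rw [this]; simp
    · rw [if_neg hc]
      have : pvCondB cs i = true := by
        simp only [pvCondB, hsliceL, hsliceR, ← hlpdef, ← hrpdef]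
        push Not at hc
        simp [hlpne, hrpne, hc.1, hc.2]
      rw [this]; simp

-- main loop invariant: A's running split index decodes B's recorded positions
theorem pvLoop_agree (cs : List Char) (rest : List Char) :
    ∀ (i : Nat) (q : Option Char) (bd pd : Int) (runs : List Nat),
      cs.drop i = rest → 0 ≤ bd → 0 ≤ pd →
      pvLoopA cs rest i q bd pd (pvLast cs runs) = pvLast cs (pvLoopB cs rest i q bd pd runs) := by
  induction rest with
  | nil => intro i q bd pd runs _ _ _; simp [pvLoopA, pvLoopB]
  | cons c rest' ih =>
    intro i q bd pd runs hdrop hbd hpd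
    have hlt : i < cs.length := by
      by_contra h
      rw [List.drop_eq_nil_of_le (by omega)] at hdrop
      exact List.cons_ne_nil c rest' hdrop.symm
    have hcons : cs[i] :: cs.drop (i + 1) = c :: rest' := by
      rw [← List.drop_eq_getElem_cons hlt, hdrop]
    injection hcons with hceq hdrop'
    cases q with
    | some qc =>
      simp only [pvLoopA, pvLoopB]
      by_cases h : (c == qc) = true ∧ PySem.List.pyGet? cs ((i : Int) - 1) ≠ some '\\'
      · rw [if_pos h, if_pos h]; exact ih (i + 1) none bd pd runs hdrop' hbd hpd
      · rw [if_neg h, if_neg h]; exact ih (i + 1) (some qc) bd pd runs hdrop' hbd hpd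
    | none =>
      simp only [pvLoopA, pvLoopB]
      by_cases h1 : (c == '\'') = true ∨ (c == '"') = true
      · rw [if_pos h1, if_pos h1]; exact ih (i + 1) (some c) bd pd runs hdrop' hbd hpd
      · rw [if_neg h1, if_neg h1]
        by_cases h2 : (c == '[') = true
        · rw [if_pos h2, if_pos h2]; exact ih (i + 1) none (bd + 1) pd runs hdrop' (by omega) hpd
        · rw [if_neg h2, if_neg h2]
          by_cases h3 : (c == ']') = true
          · rw [if_pos h3, if_pos h3]
            exact ih (i + 1) none (max 0 (bd - 1)) pd runs hdrop' (le_max_left _ _) hpd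
          · rw [if_neg h3, if_neg h3]
            by_cases h4 : (c == '(') = true
            · rw [if_pos h4, if_pos h4]; exact ih (i + 1) none bd (pd + 1) runs hdrop' hbd (by omega)
            · rw [if_neg h4, if_neg h4]
              by_cases h5 : (c == ')') = true
              · rw [if_pos h5, if_pos h5]
                exact ih (i + 1) none bd (max 0 (pd - 1)) runs hdrop' hbd (le_max_left _ _)
              · rw [if_neg h5, if_neg h5]
                by_cases h6 : bd > 0 ∨ pd > 0 ∨ ¬ PySem.Chars.isspace c
                · rw [if_pos h6]
                  have hnotB : ¬(bd = 0 ∧ pd = 0 ∧ PySem.Chars.isspace c = true) := by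
                    intro hcB
                    rcases h6 with h | h | h
                    · omega
                    · omega
                    · exact h hcB.2.2
                  rw [if_neg hnotB]
                  exact ih (i + 1) none bd pd runs hdrop' hbd hpd
                · rw [if_neg h6]
                  push Not at h6
                  obtain ⟨hbd0, hpd0, hws⟩ := h6
                  have hposB : bd = 0 ∧ pd = 0 ∧ PySem.Chars.isspace c = true :=
                    ⟨by omega, by omega, hws⟩
                  rw [if_pos hposB]
                  have hc : c = cs[i] := hceq.symm
                  have hstep :
                      (if pvScanLeft cs ((i : Int) - 1) < 0 ∨ (cs.length : Int) ≤ pvScanRight cs ((i : Int) + 1) then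
                        pvLoopA cs rest' (i + 1) none bd pd (pvLast cs runs)
                      else if pvCombo (PySem.List.pyGetD cs (pvScanLeft cs ((i : Int) - 1)) ' ')
                            ∨ pvCombo (PySem.List.pyGetD cs (pvScanRight cs ((i : Int) + 1)) ' ') then
                        pvLoopA cs rest' (i + 1) none bd pd (pvLast cs runs)
                      else pvLoopA cs rest' (i + 1) none bd pd (i : Int))
                      = pvLoopA cs rest' (i + 1) none bd pd (pvLast cs (runs ++ [i])) := by
                    rw [pvLast_append]
                    rw [← pvCond_agree cs i (pvLast cs runs) hlt]
                    split_ifs <;> rfl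
                  exact hstep.trans (ih (i + 1) none bd pd (runs ++ [i]) hdrop' hbd hpd)

-- the child string A checks is nonempty whenever B's right part is nonempty
theorem pvChild_ne_nil (cs : List Char) (j : Nat)
    (hrp : PySem.Chars.lstrip (cs.drop (j + 1)) ≠ []) :
    PySem.Chars.strip (cs.drop j) ≠ [] := by
  have hlt : j < cs.length := by
    by_contra h
    exact hrp (by rw [List.drop_eq_nil_of_le (by omega)]; rfl)
  have hdrop : cs.drop j = cs[j] :: cs.drop (j + 1) := List.drop_eq_getElem_cons hlt
  unfold PySem.Chars.strip
  by_cases hsp : PySem.Chars.isspace cs[j] = true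
  · have hl : PySem.Chars.lstrip (cs.drop j) = PySem.Chars.lstrip (cs.drop (j + 1)) := by
      unfold PySem.Chars.lstrip
      rw [hdrop, List.dropWhile_cons, if_pos hsp]
    rw [hl]
    have hne := hrp
    have hhead : PySem.Chars.isspace ((PySem.Chars.lstrip (cs.drop (j + 1))).head hne) = false := by
      unfold PySem.Chars.lstrip at hne ⊢
      exact List.head_dropWhile_not PySem.Chars.isspace hne
    obtain ⟨c', t', hct⟩ := List.exists_cons_of_ne_nil hne
    have hceq : c' = (PySem.Chars.lstrip (cs.drop (j + 1))).head hne := by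
      have hh1 : (PySem.Chars.lstrip (cs.drop (j + 1))).head? = some c' := by rw [hct]; rfl
      have hh2 := List.head?_eq_some_head hne
      rw [hh1] at hh2
      exact (Option.some.injEq _ _ ▸ hh2 : c' = _)
    rw [hct]
    refine pvRstrip_ne_nil_of_head c' t' ?_
    rw [← hceq] at hhead
    simp [hhead]
  · have hl : PySem.Chars.lstrip (cs.drop j) = cs[j] :: cs.drop (j + 1) := by
      unfold PySem.Chars.lstrip
      rw [hdrop, List.dropWhile_cons, if_neg hsp]
    rw [hl]
    exact pvRstrip_ne_nil_of_head cs[j] _ hsp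

-- ===== VERDICT (by name: the statement is the Claim_ definition above) =====
theorem extract_css_parent_if_descendant_spec : Claim_equal_extract_css_parent_if_descendant := by
  intro locator _
  unfold Spec_extract_css_parent_if_descendant
  unfold extract_css_parent_if_descendant extract_css_parent_if_descendant_alt
  dsimp only
  have hmain := pvLoop_agree locator.toList locator.toList 0 none 0 0 [] rfl le_rfl le_rfl
  have h0 : pvLast locator.toList [] = -1 := rfl
  rw [h0] at hmain
  rw [pvPickB_eq_find]
  cases hfind : (pvLoopB locator.toList locator.toList 0 none 0 0 []).reverse.find?
      (pvCondB locator.toList) with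
  | none =>
    have hsplit : pvLoopA locator.toList locator.toList 0 none 0 0 (-1) = -1 := by
      rw [hmain]; simp [pvLast, hfind]
    rw [hsplit]
    simp
  | some j =>
    have hsplit : pvLoopA locator.toList locator.toList 0 none 0 0 (-1) = (j : Int) := by
      rw [hmain]; simp [pvLast, hfind]
    have hcond := List.find?_some hfind
    obtain ⟨hne, _⟩ := (pvCondB_true_iff locator.toList j).mp hcond
    rw [not_or] at hne
    have hch : PySem.Chars.strip (PySem.List.slice locator.toList (some (j : Int)) none) ≠ [] := by
      rw [PySem.List.slice_from_natCast]
      refine pvChild_ne_nil locator.toList j ?_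
      have hc2 : PySem.List.slice locator.toList (some ((j : Int) + 1)) none
          = locator.toList.drop (j + 1) := by
        have : ((j : Int) + 1) = ((j + 1 : Nat) : Int) := by push_cast; ring
        rw [this]; exact PySem.List.slice_from_natCast locator.toList (j + 1)
      rw [← hc2]
      exact hne.2
    rw [hsplit]
    have hjpos : ¬ ((j : Int) < 0) := by omega
    rw [if_neg hjpos]
    rw [if_neg (by rw [not_or]; exact ⟨hne.1, hch⟩)]
    simp
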